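-- pv_equiv track=rewrite | github.com/aniket0951/LeetcodePractise | GeeksProblem/geeksLogical5.py | ArrangeTheArray
-- ===== SOURCE A (Python) =====
-- def ArrangeTheArray(arr):
--     neg = []
--     pos = []
--
--     for i in arr:
--         if i < 0:
--             neg.append(i)
--         else:
--             pos.append(i)
--
--     i = 0
--     while i < len(neg):
--         arr[i] = neg[i]
--         i += 1
--     j = 0
--     while j < len(pos):
--         arr[i] = pos[j]
--         j += 1
--         i += 1
--     return arr
-- ===== SOURCE B (Python) =====
-- def ArrangeTheArray(arr):
--     arr.sort(key=lambda x: 0 if x < 0 else 1)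
--     return arr
-- ===== Notes on version B (the rewrite author's own statement) =====
-- stated objective: idiomatic
-- what changed: Replaced the two-bucket partition plus index-by-index write-back with a single in-place stable sort keyed by sign (0 for negatives, 1 otherwise), whose stability preserves the relative order of each group.
import Mathlib
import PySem

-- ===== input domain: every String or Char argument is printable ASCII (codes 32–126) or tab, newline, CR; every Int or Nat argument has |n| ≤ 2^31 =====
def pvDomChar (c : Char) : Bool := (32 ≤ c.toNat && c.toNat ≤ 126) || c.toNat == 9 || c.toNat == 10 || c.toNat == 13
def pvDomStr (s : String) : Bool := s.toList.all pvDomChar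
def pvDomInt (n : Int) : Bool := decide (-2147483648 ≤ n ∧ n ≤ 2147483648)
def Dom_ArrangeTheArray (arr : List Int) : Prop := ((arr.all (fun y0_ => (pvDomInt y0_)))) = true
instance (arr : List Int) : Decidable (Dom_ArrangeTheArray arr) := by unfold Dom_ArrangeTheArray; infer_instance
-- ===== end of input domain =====

-- B replaces A's two-bucket partition + write-back loops with one in-place stable sort by sign key (idiomatic).
-- A mutates its argument in place (Python); the equivalence proved here is about the return value; B performs the same mutation.

-- ===== PORT A =====
-- the two while loops: write src into arr starting at index i, one cell per step
def pvWriteFrom (arr : List Int) (i : Nat) (src : List Int) : List Int :=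
  match src with
  | [] => arr
  | x :: xs => pvWriteFrom (arr.set i x) (i + 1) xs

def ArrangeTheArray (arr : List Int) : List Int :=
  let np := arr.foldl
    (fun (s : List Int × List Int) i =>
      if i < 0 then (s.1 ++ [i], s.2) else (s.1, s.2 ++ [i]))
    ([], [])
  let neg := np.1
  let pos := np.2
  let arr1 := pvWriteFrom arr 0 neg
  pvWriteFrom arr1 neg.length pos

-- ===== PORT B =====
def ArrangeTheArray_alt (arr : List Int) : List Int :=
  PySem.List.sorted arr (fun x => if x < 0 then (0 : Int) else 1)

-- ===== PRECONDITION & SPEC =====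
def Spec_ArrangeTheArray (arr : List Int) (out : List Int) : Prop := out = ArrangeTheArray_alt arr
instance (arr : List Int) (out : List Int) : Decidable (Spec_ArrangeTheArray arr out) := by unfold Spec_ArrangeTheArray; infer_instance

-- ===== CLAIM (what is proved, stated in full; the proofs are below) =====
def Claim_equal_ArrangeTheArray : Prop := ∀ (arr : List Int), Dom_ArrangeTheArray arr → Spec_ArrangeTheArray arr (ArrangeTheArray arr)

-- ===== LEMMAS AND PROOFS =====

theorem pvFoldPartition (arr n p : List Int) :
    arr.foldl
      (fun (s : List Int × List Int) i =>
        if i < 0 then (s.1 ++ [i], s.2) else (s.1, s.2 ++ [i]))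
      (n, p)
    = (n ++ arr.filter (fun x => decide (x < 0)),
       p ++ arr.filter (fun x => !decide (x < 0))) := by
  induction arr generalizing n p with
  | nil => simp
  | cons a t ih =>
    by_cases h : a < 0 <;> simp [List.foldl_cons, h, ih]

theorem pvSetAppend (pre : List Int) (r : Int) (rs : List Int) (x : Int) :
    (pre ++ r :: rs).set pre.length x = pre ++ x :: rs := by
  induction pre with
  | nil => rfl
  | cons a t ih => simp [ih]

theorem pvWriteFromSpec (src : List Int) (pre rest : List Int)
    (h : src.length ≤ rest.length) :
    pvWriteFrom (pre ++ rest) pre.length src = pre ++ src ++ rest.drop src.length := by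
  induction src generalizing pre rest with
  | nil => simp [pvWriteFrom]
  | cons x xs ih =>
    cases rest with
    | nil => simp at h
    | cons r rs =>
      have h' : xs.length ≤ rs.length := by simpa using h
      have := ih (pre ++ [x]) rs h'
      simp only [pvWriteFrom, pvSetAppend]
      have e1 : pre ++ x :: rs = (pre ++ [x]) ++ rs := by simp
      have e2 : pre.length + 1 = (pre ++ [x]).length := by simp
      rw [e1, e2, this]
      simp

theorem pvInsertByAppend (before : Int → Int → Bool) (x : Int) (n p : List Int)
    (hn : ∀ y ∈ n, before x y = false) (hp : ∀ y ∈ p, before x y = true) :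
    PySem.List.insertBy before x (n ++ p) = n ++ x :: p := by
  induction n with
  | nil =>
    cases p with
    | nil => rfl
    | cons a t => simp [PySem.List.insertBy, hp a (by simp)]
  | cons a t ih =>
    have ha : before x a = false := hn a (by simp)
    simp only [List.cons_append, PySem.List.insertBy, ha]
    simp only [Bool.false_eq_true, if_false]
    rw [ih (fun y hy => hn y (by simp [hy]))]

theorem pvSortedPartition (arr : List Int) :
    PySem.List.sorted arr (fun x => if x < 0 then (0 : Int) else 1)
    = arr.filter (fun x => decide (x < 0)) ++ arr.filter (fun x => !decide (x < 0)) := by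
  rw [PySem.List.sorted_eq_foldl_insertBy]
  suffices H : ∀ (t n p : List Int), (∀ y ∈ n, y < 0) → (∀ y ∈ p, ¬ y < 0) →
      t.foldl (fun acc x => PySem.List.insertBy
        (fun a b => decide ((if a < 0 then (0 : Int) else 1) < (if b < 0 then (0 : Int) else 1))) x acc)
        (n ++ p)
      = (n ++ t.filter (fun x => decide (x < 0))) ++ (p ++ t.filter (fun x => !decide (x < 0))) by
    have := H arr [] [] (by simp) (by simp)
    simpa using this
  intro t
  induction t with
  | nil => intro n p _ _; simp
  | cons x xs ih =>
    intro n p hn hp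
    by_cases hx : x < 0
    · have step : PySem.List.insertBy
          (fun a b => decide ((if a < 0 then (0 : Int) else 1) < (if b < 0 then (0 : Int) else 1))) x (n ++ p)
          = (n ++ [x]) ++ p := by
        rw [pvInsertByAppend]
        · simp
        · intro y hy; simp [hx, hn y hy]
        · intro y hy; simp [hx, hp y hy]
      simp only [List.foldl_cons, step]
      rw [ih (n ++ [x]) p (by intro y hy; rcases List.mem_append.1 hy with h | h
                              · exact hn y h
                              · simp at h; omega) hp]
      simp [hx]
    · have step : PySem.List.insertBy
          (fun a b => decide ((if a < 0 then (0 : Int) else 1) < (if b < 0 then (0 : Int) else 1))) x (n ++ p)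
          = n ++ (p ++ [x]) := by
        have := PySem.List.insertBy_of_forall_not_before
          (fun a b => decide ((if a < 0 then (0 : Int) else 1) < (if b < 0 then (0 : Int) else 1))) x (n ++ p)
          (by intro y _; simp [hx]; split_ifs <;> omega)
        simpa using this
      simp only [List.foldl_cons, step]
      rw [ih n (p ++ [x]) hn (by intro y hy; rcases List.mem_append.1 hy with h | h
                                 · exact hp y h
                                 · simp at h; omega)]
      simp [hx]

theorem pvA_eq (arr : List Int) :
    ArrangeTheArray arr
    = arr.filter (fun x => decide (x < 0)) ++ arr.filter (fun x => !decide (x < 0)) := by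
  unfold ArrangeTheArray
  have hnp := pvFoldPartition arr [] []
  simp only [List.nil_append] at hnp
  rw [hnp]
  set neg := arr.filter (fun x => decide (x < 0)) with hneg
  set pos := arr.filter (fun x => !decide (x < 0)) with hpos
  have hlen : neg.length + pos.length = arr.length := by
    rw [hneg, hpos]
    simpa using (List.length_eq_length_filter_add (l := arr) (fun x => decide (x < 0))).symm
  have h1 : pvWriteFrom arr 0 neg = neg ++ arr.drop neg.length := by
    have := pvWriteFromSpec neg [] arr (by omega)
    simpa using this
  simp only [h1]
  have h2 : pvWriteFrom (neg ++ arr.drop neg.length) neg.length pos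
      = neg ++ pos ++ (arr.drop neg.length).drop pos.length := by
    exact pvWriteFromSpec pos neg (arr.drop neg.length) (by simp; omega)
  rw [h2]
  have : (arr.drop neg.length).drop pos.length = [] := by
    apply List.drop_eq_nil_of_le
    simp
    omega
  simp [this]

-- ===== VERDICT (by name: the statement is the Claim_ definition above) =====
theorem ArrangeTheArray_spec : Claim_equal_ArrangeTheArray := by
  intro arr _
  unfold Spec_ArrangeTheArray ArrangeTheArray_alt
  rw [pvA_eq, pvSortedPartition]
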